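-- pv_equiv track=rewrite | github.com/jdkent/ns-pond-ingestion-workflow | ingestion_workflow/workflow/orchastrator.py | _normalize_stages
-- ===== SOURCE A (Python) =====
-- from typing import Dict, List, Sequence
--
-- CANONICAL_STAGES: List[str] = [
--     "gather",
--     "download",
--     "extract",
--     "create_analyses",
--     "upload",
--     "sync",
-- ]
--
-- def _normalize_stages(stages: Sequence[str] | None) -> List[str]:
--     requested = (
--         [stage.lower() for stage in stages if stage]
--         if stages
--         else list(CANONICAL_STAGES)
--     )
--     invalid = [stage for stage in requested if stage not in CANONICAL_STAGES]
--     if invalid: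
--         raise ValueError(
--             f"Unknown stages requested: {', '.join(sorted(set(invalid)))}"
--         )
--     requested_set = set(requested) or set(CANONICAL_STAGES)
--     return [stage for stage in CANONICAL_STAGES if stage in requested_set]
-- ===== SOURCE B (Python) =====
-- from typing import Dict, List, Sequence
--
-- CANONICAL_STAGES: List[str] = [
--     "gather",
--     "download",
--     "extract",
--     "create_analyses",
--     "upload",
--     "sync",
-- ]
--
-- def _normalize_stages(stages: "Sequence[str] | None") -> List[str]:
--     if not stages:
--         return list(CANONICAL_STAGES)
--     rank = {stage: i for i, stage in enumerate(CANONICAL_STAGES)}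
--     wanted = set()
--     invalid = set()
--     for stage in stages:
--         if stage:
--             s = stage.lower()
--             if s in rank:
--                 wanted.add(s)
--             else:
--                 invalid.add(s)
--     if invalid:
--         raise ValueError(
--             f"Unknown stages requested: {', '.join(sorted(invalid))}"
--         )
--     if not wanted:
--         return list(CANONICAL_STAGES)
--     return sorted(wanted, key=rank.__getitem__)
-- ===== Notes on version B (the rewrite author's own statement) =====
-- stated objective: alternative
-- what changed: B short-circuits falsy input to the canonical list, then does a single pass classifying each lowered stage into wanted/invalid sets against a rank index, and returns sorted(wanted, key=rank) instead of A's three staged comprehensions plus a rescan of CANONICAL_STAGES.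
-- outside the precondition, e.g. on _normalize_stages(['bad']): A raises ValueError, B raises ValueError
import Mathlib
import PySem

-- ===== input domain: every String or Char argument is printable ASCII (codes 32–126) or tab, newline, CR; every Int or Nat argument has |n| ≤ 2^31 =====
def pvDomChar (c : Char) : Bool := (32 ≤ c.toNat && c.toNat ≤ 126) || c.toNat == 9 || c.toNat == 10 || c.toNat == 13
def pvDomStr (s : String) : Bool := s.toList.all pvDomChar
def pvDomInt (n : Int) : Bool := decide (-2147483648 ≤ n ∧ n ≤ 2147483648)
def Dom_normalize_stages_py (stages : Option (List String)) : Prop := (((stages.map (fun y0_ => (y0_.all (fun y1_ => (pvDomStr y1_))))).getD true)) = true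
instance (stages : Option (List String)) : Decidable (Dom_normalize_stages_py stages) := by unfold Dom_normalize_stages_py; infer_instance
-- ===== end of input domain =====

-- B replaces A's three staged list comprehensions by one early return plus a single pass that
-- classifies each stage into wanted/invalid sets, then sorts the wanted set by a rank index;
-- equivalence is about the return value (A raises ValueError on unknown stages — excluded by Pre_).

-- ===== PORT A =====
def pvCANONICAL : List String :=
  ["gather", "download", "extract", "create_analyses", "upload", "sync"]

def normalize_stages_py (stages : Option (List String)) : List String :=
  let requested : List String :=
    match stages with
    | some l =>
        if l ≠ [] then (l.filter (fun s => s ≠ "")).map PySem.Str.lower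
        else pvCANONICAL                      -- `if stages` is false for None and []
    | none => pvCANONICAL
  let invalid := requested.filter (fun s => !(pvCANONICAL.contains s))
  if invalid ≠ [] then []                     -- raise ValueError: excluded by Pre_
  else
    let requestedSet : PySem.Set String := PySem.Set.ofList requested
    let requestedSet := if requestedSet = [] then PySem.Set.ofList pvCANONICAL else requestedSet
    pvCANONICAL.filter (fun s => PySem.Set.contains requestedSet s)

-- ===== PORT B =====
def pvRank : PySem.Dict String Int :=
  (PySem.List.enumerate pvCANONICAL).foldl (fun d p => d.insert p.2 p.1) PySem.Dict.empty

def pvClassify (rank : PySem.Dict String Int)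
    (p : PySem.Set String × PySem.Set String) (stage : String) :
    PySem.Set String × PySem.Set String :=
  if stage ≠ "" then
    let s := PySem.Str.lower stage
    if rank.contains s then (p.1.add s, p.2) else (p.1, p.2.add s)
  else p

def normalize_stages_py_alt (stages : Option (List String)) : List String :=
  match stages with
  | none => pvCANONICAL
  | some l =>
    if l = [] then pvCANONICAL
    else
      let acc := l.foldl (pvClassify pvRank) (PySem.Set.empty, PySem.Set.empty)
      if acc.2 ≠ [] then []                   -- raise ValueError: excluded by Pre_
      else if acc.1 = [] then pvCANONICAL
      else PySem.List.sorted acc.1 (fun s => pvRank.getD s 0) false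

-- ===== PRECONDITION & SPEC =====
-- Pre_ excludes exactly the inputs on which A raises ValueError: a requested stage whose
-- lowercasing is not a canonical stage name.
def Pre_normalize_stages_py (stages : Option (List String)) : Prop :=
  ∀ s ∈ stages.getD [], s ≠ "" → PySem.Str.lower s ∈ pvCANONICAL
instance (stages : Option (List String)) : Decidable (Pre_normalize_stages_py stages) := by
  unfold Pre_normalize_stages_py; infer_instance

def pvWitness_normalize_stages_py : Option (List String) := some ["SYNC", "gather", "", "gather"]

def Spec_normalize_stages_py (stages : Option (List String)) (out : List String) : Prop := out = normalize_stages_py_alt stages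
instance (stages : Option (List String)) (out : List String) : Decidable (Spec_normalize_stages_py stages out) := by unfold Spec_normalize_stages_py; infer_instance

-- ===== CLAIM (what is proved, stated in full; the proofs are below) =====
def Claim_equal_normalize_stages_py : Prop := ∀ (stages : Option (List String)), Dom_normalize_stages_py stages → Pre_normalize_stages_py stages → Spec_normalize_stages_py stages (normalize_stages_py stages)

-- ===== LEMMAS AND PROOFS =====

theorem pvRank_keys : pvRank.keys = pvCANONICAL := by decide

theorem pvRank_contains (s : String) : pvRank.contains s = pvCANONICAL.contains s := by
  rw [PySem.Dict.contains_eq_decide_mem_keys, pvRank_keys, List.contains_eq_mem]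

theorem pvCANONICAL_nodup : pvCANONICAL.Nodup := by decide

theorem pvCANONICAL_pairwise_rank :
    pvCANONICAL.Pairwise (fun a b => pvRank.getD a 0 < pvRank.getD b 0) := by decide

-- B's single pass, when every non-empty stage lowers into a canonical name, accumulates
-- exactly set(requested) in the wanted slot and leaves invalid empty
theorem classify_valid (l : List String)
    (h : ∀ s ∈ l, s ≠ "" → PySem.Str.lower s ∈ pvCANONICAL) (w : PySem.Set String) :
    l.foldl (pvClassify pvRank) (w, []) =
      (((l.filter (fun s => s ≠ "")).map PySem.Str.lower).foldl PySem.Set.add w, []) := by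
  induction l generalizing w with
  | nil => rfl
  | cons x xs ih =>
      by_cases hx : x = ""
      · subst hx
        simpa [pvClassify] using ih (fun s hs => h s (List.mem_cons_of_mem _ hs)) w
      · have hmem : PySem.Str.lower x ∈ pvCANONICAL := h x (List.mem_cons_self) hx
        have hc : pvRank.contains (PySem.Str.lower x) = true := by
          rw [pvRank_contains, List.contains_eq_mem]; exact decide_eq_true hmem
        have hstep : pvClassify pvRank (w, []) x = (w.add (PySem.Str.lower x), []) := by
          simp [pvClassify, hx, hc]
        rw [List.foldl_cons, hstep, ih (fun s hs => h s (List.mem_cons_of_mem _ hs))]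
        simp [List.filter_cons, hx]

-- core: sorting a duplicate-free list of canonical stages by rank = canonical-order filter
theorem sorted_rank_eq_filter (xs : List String) (hnd : xs.Nodup)
    (hsub : ∀ s ∈ xs, s ∈ pvCANONICAL) :
    PySem.List.sorted xs (fun s => pvRank.getD s 0) false
      = pvCANONICAL.filter (fun s => PySem.Set.contains xs s) := by
  apply PySem.List.sorted_eq_of_perm_of_pairwise_lt
  · rw [List.perm_ext_iff_of_nodup (pvCANONICAL_nodup.filter _) hnd]
    intro a
    simp [List.mem_filter, PySem.Set.contains]
    intro h; exact hsub a h
  · exact pvCANONICAL_pairwise_rank.sublist List.filter_sublist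

theorem filter_canonical_self :
    pvCANONICAL.filter (fun s => PySem.Set.contains (PySem.Set.ofList pvCANONICAL) s)
      = pvCANONICAL := by decide

-- ===== VERDICT (by name: the statement is the Claim_ definition above) =====
theorem normalize_stages_py_spec : Claim_equal_normalize_stages_py := by
  intro stages _ hpre
  unfold Spec_normalize_stages_py normalize_stages_py normalize_stages_py_alt
  cases stages with
  | none =>
      simp only []
      have hinv : pvCANONICAL.filter (fun s => !(pvCANONICAL.contains s)) = [] := by decide
      rw [hinv]
      simpa using filter_canonical_self.symm
  | some l =>
      by_cases hl : l = []
      · subst hl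
        simp only [ne_eq, not_true_eq_false, if_false, if_pos rfl]
        have hinv : pvCANONICAL.filter (fun s => !(pvCANONICAL.contains s)) = [] := by decide
        rw [hinv]
        simpa using filter_canonical_self.symm
      · have hval : ∀ s ∈ l, s ≠ "" → PySem.Str.lower s ∈ pvCANONICAL := by
          simpa using hpre
        simp only [hl, ne_eq, not_false_eq_true, if_true, if_neg hl]
        set requested := (l.filter (fun s => s ≠ "")).map PySem.Str.lower with hreqdef
        have hsub : ∀ s ∈ requested, s ∈ pvCANONICAL := by
          intro s hs
          obtain ⟨t, ht, rfl⟩ := List.mem_map.mp hs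
          have := List.mem_filter.mp ht
          exact hval t this.1 (by simpa using this.2)
        have hinv : requested.filter (fun s => !(pvCANONICAL.contains s)) = [] := by
          rw [List.filter_eq_nil_iff]
          intro s hs
          simp [List.contains_eq_mem, hsub s hs]
        have hacc : l.foldl (pvClassify pvRank) (PySem.Set.empty, PySem.Set.empty) =
            (PySem.Set.ofList requested, []) := by
          rw [PySem.Set.ofList_eq_foldl]
          exact classify_valid l hval PySem.Set.empty
        rw [hinv, hacc]
        simp only [ne_eq, not_true_eq_false, if_false]
        by_cases hempty : (PySem.Set.ofList requested : List String) = []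
        · rw [if_pos hempty, if_pos hempty]
          exact filter_canonical_self.symm
        · rw [if_neg hempty, if_neg hempty]
          exact (sorted_rank_eq_filter _ (PySem.Set.nodup_ofList _)
            (fun s hs => hsub s ((PySem.Set.mem_ofList _ _).mp hs))).symm
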